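-- pv_equiv track=rewrite | github.com/AlexeyBazanov/algorithms | sprint_4/code_review/search_system.py | get_ordered_relevant_docs
-- ===== SOURCE A (Python) =====
-- def sort_dict(d, key, reverse=True):
--     sorted_dict = {}
--     sorted_tuples = sorted(d.items(), key=key, reverse=reverse)
--
--     for i in sorted_tuples:
--         sorted_dict[i[0]] = i[1]
--
--     return sorted_dict
--
-- def get_ordered_relevant_docs(relevant_docs, docs_map):
--     docs_by_frequency = {}
--
--     relevant_docs = sort_dict(relevant_docs, key=lambda x: x[1])
--
--     for doc_hash in relevant_docs:
--         frequency = relevant_docs[doc_hash]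
--         docs_numbers = docs_map[doc_hash]
--
--         if frequency not in docs_by_frequency:
--             docs_by_frequency[frequency] = []
--
--         docs_by_frequency[frequency] += docs_numbers
--
--     for frequency in docs_by_frequency:
--         docs_by_frequency[frequency] = sorted(docs_by_frequency[frequency])
--
--     return docs_by_frequency
-- ===== SOURCE B (Python) =====
-- def get_ordered_relevant_docs(relevant_docs, docs_map):
--     def build(items):
--         if not items:
--             return {}
--         top = max(f for _, f in items)
--         group = sorted(n for d, f in items if f == top for n in docs_map[d])
--         result = {top: group}
--         result.update(build([(d, f) for d, f in items if f != top]))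
--         return result
--     return build(list(relevant_docs.items()))
-- ===== Notes on version B (the rewrite author's own statement) =====
-- stated objective: alternative
-- what changed: B replaces A's sort-the-whole-dict-then-bucket pipeline by a recursive selection scheme: it repeatedly extracts the maximum remaining frequency, emits that group (collecting and sorting its doc numbers directly from the unsorted items), and recurses on the items with smaller frequencies; no pre-sort of relevant_docs and no intermediate grouping dict exist.
import Mathlib
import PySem

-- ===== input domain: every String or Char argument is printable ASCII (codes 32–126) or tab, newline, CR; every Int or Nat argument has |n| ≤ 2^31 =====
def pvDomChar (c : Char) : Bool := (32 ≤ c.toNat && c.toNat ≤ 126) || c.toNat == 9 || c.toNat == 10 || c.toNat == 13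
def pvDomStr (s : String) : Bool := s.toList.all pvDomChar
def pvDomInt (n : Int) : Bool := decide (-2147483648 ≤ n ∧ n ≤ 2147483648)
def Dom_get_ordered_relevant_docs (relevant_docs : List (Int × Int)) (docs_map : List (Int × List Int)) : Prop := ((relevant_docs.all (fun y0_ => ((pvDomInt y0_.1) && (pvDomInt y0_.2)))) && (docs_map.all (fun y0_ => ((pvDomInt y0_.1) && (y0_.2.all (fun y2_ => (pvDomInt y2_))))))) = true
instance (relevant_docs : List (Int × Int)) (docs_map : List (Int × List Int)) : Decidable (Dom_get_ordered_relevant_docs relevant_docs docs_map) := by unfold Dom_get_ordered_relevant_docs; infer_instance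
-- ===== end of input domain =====

-- B replaces A's sort-the-whole-dict-then-bucket pipeline by a recursive selection scheme: it
-- repeatedly extracts the maximum remaining frequency, emits that group directly from the unsorted
-- items, and recurses on the items of smaller frequency (objective: alternative).
-- Both dict parameters are modelled as association lists normalised through PySem.Dict.ofList
-- (insertion order, last value wins), exactly Python's dict construction.

-- ===== PORT A =====
def get_ordered_relevant_docs (relevant_docs : List (Int × Int)) (docs_map : List (Int × List Int)) : List (Int × List Int) :=
  let rd : PySem.Dict Int Int := PySem.Dict.ofList relevant_docs
  let dm : PySem.Dict Int (List Int) := PySem.Dict.ofList docs_map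
  -- sort_dict(relevant_docs, key=lambda x: x[1]): sort the items by value, reverse=True, rebuild a dict
  let sorted_tuples := PySem.List.sorted rd.items (fun x => x.2) true
  let rd2 : PySem.Dict Int Int := sorted_tuples.foldl (fun d i => d.insert i.1 i.2) PySem.Dict.empty
  -- for doc_hash in relevant_docs: … (docs_map[doc_hash] raises KeyError outside Pre_; getD is exact inside it)
  let dbf : PySem.Dict Int (List Int) := rd2.keys.foldl (fun d doc_hash =>
    let frequency := rd2.getD doc_hash 0
    let docs_numbers := dm.getD doc_hash []
    let d := if d.contains frequency then d else d.insert frequency []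
    d.insert frequency (d.getD frequency [] ++ docs_numbers)) PySem.Dict.empty
  -- for frequency in docs_by_frequency: sort each bucket in place
  let dbf2 := dbf.keys.foldl (fun d frequency =>
    d.insert frequency (PySem.List.sorted (d.getD frequency []) (fun x => x) false)) dbf
  dbf2.items

-- ===== PORT B =====
-- build(items): if not items: return {}; top = max of the frequencies; emit top's group, recurse on
-- the items with other frequencies.  (max? items = none exactly when items = [], Python's empty
-- check; the Nat fuel, started at the item count, only makes the recursion structural — each call
-- strictly shrinks the item list, so the fuel is never exhausted.)
def pvBuild (dm : PySem.Dict Int (List Int)) : Nat → List (Int × Int) → PySem.Dict Int (List Int)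
  | 0, _ => PySem.Dict.empty
  | fuel + 1, items =>
    match PySem.List.max? items (fun p => p.2) with
    | none => PySem.Dict.empty
    | some m =>
      let top := m.2
      -- group = sorted(n for d, f in items if f == top for n in docs_map[d])
      let group := PySem.List.sorted
        ((items.filter (fun p => p.2 == top)).flatMap (fun p => dm.getD p.1 [])) (fun x => x) false
      -- result = {top: group}; result.update(build([(d, f) for d, f in items if f != top]))
      let rest := items.filter (fun p => !(p.2 == top))
      (PySem.Dict.empty.insert top group).update (pvBuild dm fuel rest).items

def get_ordered_relevant_docs_alt (relevant_docs : List (Int × Int)) (docs_map : List (Int × List Int)) : List (Int × List Int) :=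
  let rd : PySem.Dict Int Int := PySem.Dict.ofList relevant_docs
  let dm : PySem.Dict Int (List Int) := PySem.Dict.ofList docs_map
  (pvBuild dm rd.items.length rd.items).items

-- ===== PRECONDITION & SPEC =====
-- Pre_ excludes exactly the inputs where Python A raises KeyError: some doc hash of relevant_docs
-- has no entry in docs_map.
def Pre_get_ordered_relevant_docs (relevant_docs : List (Int × Int)) (docs_map : List (Int × List Int)) : Prop :=
  (relevant_docs.all (fun p => docs_map.any (fun q => q.1 == p.1))) = true
instance (relevant_docs : List (Int × Int)) (docs_map : List (Int × List Int)) : Decidable (Pre_get_ordered_relevant_docs relevant_docs docs_map) := by unfold Pre_get_ordered_relevant_docs; infer_instance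

def pvWitness_get_ordered_relevant_docs : (List (Int × Int)) × (List (Int × List Int)) :=
  ([(1, 2), (3, 2), (4, 1)], [(1, [5, 2]), (3, [7]), (4, [9])])

def Spec_get_ordered_relevant_docs (relevant_docs : List (Int × Int)) (docs_map : List (Int × List Int)) (out : List (Int × List Int)) : Prop := out = get_ordered_relevant_docs_alt relevant_docs docs_map
instance (relevant_docs : List (Int × Int)) (docs_map : List (Int × List Int)) (out : List (Int × List Int)) : Decidable (Spec_get_ordered_relevant_docs relevant_docs docs_map out) := by unfold Spec_get_ordered_relevant_docs; infer_instance

-- ===== CLAIM (what is proved, stated in full; the proofs are below) =====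
def Claim_equal_get_ordered_relevant_docs : Prop := ∀ (relevant_docs : List (Int × Int)) (docs_map : List (Int × List Int)), Dom_get_ordered_relevant_docs relevant_docs docs_map → Pre_get_ordered_relevant_docs relevant_docs docs_map → Spec_get_ordered_relevant_docs relevant_docs docs_map (get_ordered_relevant_docs relevant_docs docs_map)

-- ===== LEMMAS AND PROOFS =====

-- The per-frequency bucket both characterisations share: the doc lists of the items with that
-- frequency, concatenated in item order.
def pvBucket (dm : PySem.Dict Int (List Int)) (xs : List (Int × Int)) (k : Int) : List Int :=
  (xs.filter (fun p => p.2 == k)).flatMap (fun p => dm.getD p.1 [])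

-- A's grouping fold (one dict-building pass over (hash, frequency) pairs), for characterising A.
def pvGroup (dm : PySem.Dict Int (List Int)) (xs : List (Int × Int)) : PySem.Dict Int (List Int) :=
  xs.foldl (fun g p => g.insert p.2 (g.getD p.2 [] ++ dm.getD p.1 [])) PySem.Dict.empty

-- A's loop body ("if f not in d: d[f] = []; d[f] += docs") is one insert.
theorem pvBody_eq (d : PySem.Dict Int (List Int)) (f : Int) (ds : List Int) :
    (let d' := if d.contains f then d else d.insert f []
     d'.insert f (d'.getD f [] ++ ds)) = d.insert f (d.getD f [] ++ ds) := by
  by_cases h : d.contains f = true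
  · simp [h]
  · simp only [h, Bool.false_eq_true, if_false]
    rw [PySem.Dict.getD_insert_self, PySem.Dict.insert_insert_self,
        PySem.Dict.getD_of_not_contains d _ (by simpa using h)]

-- Value of the grouping fold at any key: the bucket.
theorem pvGroup_getD (dm : PySem.Dict Int (List Int)) (xs : List (Int × Int)) (c : Int) :
    (pvGroup dm xs).getD c [] = pvBucket dm xs c := by
  suffices h : ∀ (g : PySem.Dict Int (List Int)),
      (xs.foldl (fun g p => g.insert p.2 (g.getD p.2 [] ++ dm.getD p.1 [])) g).getD c [] =
        g.getD c [] ++ pvBucket dm xs c by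
    simpa [pvGroup, PySem.Dict.getD_empty] using h PySem.Dict.empty
  induction xs with
  | nil => simp [pvBucket]
  | cons p t ih =>
    intro g
    simp only [List.foldl_cons, ih, pvBucket, List.filter_cons]
    by_cases hc : p.2 = c
    · simp [hc, PySem.Dict.getD_insert_self]
    · simp [hc, PySem.Dict.getD_insert_of_ne g _ _ (fun h => hc h.symm)]

-- Keys of the grouping fold: the distinct frequencies, first occurrences in list order.
theorem pvGroup_keys (dm : PySem.Dict Int (List Int)) (xs : List (Int × Int)) :
    (pvGroup dm xs).keys = PySem.Set.ofList (xs.map (fun p => p.2)) := by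
  unfold pvGroup
  rw [PySem.Dict.keys_foldl_insert_key, PySem.Dict.keys_empty, PySem.Set.update_nil_left]

theorem pvGroup_keys_nodup (dm : PySem.Dict Int (List Int)) (xs : List (Int × Int)) :
    (pvGroup dm xs).keys.Nodup := by
  rw [pvGroup_keys]; exact PySem.Set.nodup_ofList _

-- Buckets of permuted item lists are permutations of each other.
theorem pvBucket_perm (dm : PySem.Dict Int (List Int)) {xs ys : List (Int × Int)}
    (h : xs.Perm ys) (c : Int) : (pvBucket dm xs c).Perm (pvBucket dm ys c) := by
  simp only [pvBucket, List.flatMap_def]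
  exact ((h.filter _).map _).flatten

-- Deduplicating a weakly descending list of Ints gives a strictly descending list.
theorem pvOfList_pairwise_gt {xs : List Int} (h : xs.Pairwise (fun a b => b ≤ a)) :
    (PySem.Set.ofList xs).Pairwise (fun a b => b < a) := by
  induction xs with
  | nil => simp [PySem.Set.ofList]
  | cons x t ih =>
    rw [List.pairwise_cons] at h
    rw [PySem.Set.ofList_cons]
    refine List.Pairwise.cons ?_ ?_
    · intro y hy
      have hmem := (PySem.Set.mem_discard _ _ _).1 hy
      exact lt_of_le_of_ne (h.1 y ((PySem.Set.mem_ofList _ _).1 hmem.1)) hmem.2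
    · have hp := ih h.2
      have hsub : (PySem.Set.discard (PySem.Set.ofList t) x).Sublist (PySem.Set.ofList t) := by
        simp [PySem.Set.discard, List.filter_sublist]
      exact hp.sublist hsub

-- Dedup commutes with a value filter.
theorem pvOfList_filter (l : List Int) (q : Int → Bool) :
    PySem.Set.ofList (l.filter q) = (PySem.Set.ofList l).filter q := by
  induction l with
  | nil => rfl
  | cons x t ih =>
    by_cases hx : q x = true
    · rw [List.filter_cons_of_pos hx, PySem.Set.ofList_cons, PySem.Set.ofList_cons,
        List.filter_cons_of_pos hx]
      congr 1
      rw [ih]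
      simp only [PySem.Set.discard]
      exact List.filter_comm _ _ _
    · rw [List.filter_cons_of_neg (by simp [hx]), ih, PySem.Set.ofList_cons,
        List.filter_cons_of_neg (by simp [hx])]
      simp only [PySem.Set.discard]
      have hall : ∀ a ∈ (PySem.Set.ofList t).filter q, (fun y => !(y == x)) a = true := by
        intro a ha
        have hq : q a = true := List.of_mem_filter ha
        have hne : a ≠ x := fun h => hx (h ▸ hq)
        simp [hne]
      calc List.filter q (PySem.Set.ofList t)
          = List.filter (fun y => !(y == x)) (List.filter q (PySem.Set.ofList t)) :=
            (List.filter_eq_self.2 hall).symm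
        _ = List.filter q (List.filter (fun y => !(y == x)) (PySem.Set.ofList t)) :=
            List.filter_comm _ _ _

-- Pulling the maximum off a nodup list: sorted(K, reverse=True) starts with the maximum.
theorem pvSortedDesc_cons (K : List Int) (top : Int) (hnd : K.Nodup) (hmem : top ∈ K)
    (hmax : ∀ y ∈ K, y ≤ top) :
    PySem.List.sorted K (fun f => f) true
      = top :: PySem.List.sorted (K.filter (fun y => !(y == top))) (fun f => f) true := by
  apply PySem.List.sorted_rev_eq_of_perm_of_pairwise_gt
  · have h1 : K.filter (fun y => !(y == top)) = K.erase top := by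
      rw [hnd.erase_eq_filter top]; simp [bne]
    refine List.Perm.trans ?_ (List.perm_cons_erase hmem).symm
    refine List.Perm.cons top ?_
    exact (PySem.List.sorted_perm (K.filter (fun y => !(y == top))) _ true).trans
      (by rw [h1])
  · constructor
    · intro y hy
      have hy' := (PySem.List.mem_sorted _ _ _ _).1 hy
      have hmemK : y ∈ K := List.mem_of_mem_filter hy'
      have hne : y ≠ top := by simpa using List.of_mem_filter hy'
      exact lt_of_le_of_ne (hmax y hmemK) hne
    · have hle := PySem.List.sorted_pairwise_rev (K.filter (fun y => !(y == top))) (fun f => f)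
      have hndS : (PySem.List.sorted (K.filter (fun y => !(y == top))) (fun f => f) true).Nodup :=
        (PySem.List.sorted_perm _ _ _).nodup_iff.2 (hnd.filter _)
      exact (hle.and hndS).imp (fun h => lt_of_le_of_ne h.1 (Ne.symm h.2))

-- Filtering away another frequency leaves a bucket unchanged.
theorem pvBucket_filter_ne (dm : PySem.Dict Int (List Int)) (xs : List (Int × Int))
    (top k : Int) (h : k ≠ top) :
    pvBucket dm (xs.filter (fun p => !(p.2 == top))) k = pvBucket dm xs k := by
  unfold pvBucket
  rw [List.filter_filter]
  congr 1
  apply List.filter_congr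
  intro p _
  by_cases h2 : p.2 = k
  · simp [h2, h]
  · simp [h2]

-- Characterisation of B's recursion: the items of build(xs) are the distinct frequencies in
-- descending order, each paired with its sorted bucket.
-- Map/filter exchange used to describe the recursive call's frequencies.
theorem pvMapFilter (xs : List (Int × Int)) (top : Int) :
    (xs.filter (fun p => !(p.2 == top))).map (fun p => p.2)
      = (xs.map (fun p => p.2)).filter (fun y => !(y == top)) := by
  induction xs with
  | nil => rfl
  | cons a t ih => by_cases h : a.2 = top <;> simp [h, ih]

-- Characterisation of B's recursion: the items of build(xs) are the distinct frequencies in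
-- descending order, each paired with its sorted bucket.
theorem pvBuild_items (dm : PySem.Dict Int (List Int)) (fuel : Nat) (xs : List (Int × Int))
    (hle : xs.length ≤ fuel) :
    (pvBuild dm fuel xs).items =
      (PySem.List.sorted (PySem.Set.ofList (xs.map (fun p => p.2))) (fun f => f) true).map
        (fun k => (k, PySem.List.sorted (pvBucket dm xs k) (fun x => x) false)) := by
  induction fuel generalizing xs with
  | zero =>
    have hxs : xs = [] := List.length_eq_zero_iff.1 (Nat.le_zero.1 hle)
    subst hxs
    rfl
  | succ fuel ih =>
    cases hm : PySem.List.max? xs (fun p => p.2) with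
    | none =>
      have hxs : xs = [] := (PySem.List.max?_eq_none_iff _ _).1 hm
      subst hxs
      rw [pvBuild]
      simp only [hm]
      rfl
    | some m =>
      rw [pvBuild]
      simp only [hm]
      have hlt : (xs.filter (fun p => !(p.2 == m.2))).length < xs.length :=
        List.length_filter_lt_length_iff_exists.2 ⟨m, PySem.List.max?_mem hm, by simp⟩
      have ihr := ih (xs.filter (fun p => !(p.2 == m.2))) (by omega)
      have hndK : (PySem.Set.ofList (xs.map (fun p => p.2))).Nodup := PySem.Set.nodup_ofList _
      have hmemK : m.2 ∈ PySem.Set.ofList (xs.map (fun p => p.2)) := (PySem.Set.mem_ofList _ _).2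
        (List.mem_map_of_mem (f := fun p => p.2) (PySem.List.max?_mem hm))
      have hmaxK : ∀ y ∈ PySem.Set.ofList (xs.map (fun p => p.2)), y ≤ m.2 := by
        intro y hy
        obtain ⟨p, hp, hpy⟩ := List.mem_map.1 ((PySem.Set.mem_ofList _ _).1 hy)
        exact hpy ▸ PySem.List.max?_isMax hm p hp
      -- the descending key list splits off its maximum
      have hsplit := pvSortedDesc_cons (PySem.Set.ofList (xs.map (fun p => p.2))) m.2 hndK hmemK hmaxK
      -- rest's distinct frequencies are the distinct frequencies minus the maximum
      have hrestK : PySem.Set.ofList ((xs.filter (fun p => !(p.2 == m.2))).map (fun p => p.2))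
          = (PySem.Set.ofList (xs.map (fun p => p.2))).filter (fun y => !(y == m.2)) := by
        rw [pvMapFilter, pvOfList_filter]
      -- the recursive dict has only keys ≠ m.2
      have hfresh : ∀ a ∈ (pvBuild dm fuel (xs.filter (fun p => !(p.2 == m.2)))).items,
          (PySem.Dict.empty.insert m.2
            (PySem.List.sorted (pvBucket dm xs m.2) (fun x => x) false)).contains a.1 = false := by
        intro a ha
        rw [ihr] at ha
        obtain ⟨k, hk, hka⟩ := List.mem_map.1 ha
        have hkmem := (PySem.List.mem_sorted _ _ _ _).1 hk
        rw [hrestK] at hkmem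
        have hkne : k ≠ m.2 := by simpa using List.of_mem_filter hkmem
        rw [← hka]
        simp [PySem.Dict.contains_insert, PySem.Dict.contains_empty, hkne]
      have hndrest : ((pvBuild dm fuel (xs.filter (fun p => !(p.2 == m.2)))).items.map
          (fun p => p.1)).Nodup := by
        rw [ihr, List.map_map]
        have heq : ((PySem.List.sorted (PySem.Set.ofList ((xs.filter (fun p => !(p.2 == m.2))).map
              (fun p => p.2))) (fun f => f) true).map
            ((fun p => p.1) ∘ (fun k => (k, PySem.List.sorted
              (pvBucket dm (xs.filter (fun p => !(p.2 == m.2))) k) (fun x => x) false))))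
            = PySem.List.sorted (PySem.Set.ofList ((xs.filter (fun p => !(p.2 == m.2))).map
              (fun p => p.2))) (fun f => f) true :=
          (List.map_congr_left (fun k _ => rfl)).trans (List.map_id _)
        rw [heq]
        exact (PySem.List.sorted_perm _ _ _).nodup_iff.2 (PySem.Set.nodup_ofList _)
      -- the recursive call's items, with each bucket read back on the full item list
      have htail : (pvBuild dm fuel (xs.filter (fun p => !(p.2 == m.2)))).items
          = ((PySem.Set.ofList (xs.map (fun p => p.2))).filter (fun y => !(y == m.2))
              |> (PySem.List.sorted · (fun f => f) true)).map
              (fun k => (k, PySem.List.sorted (pvBucket dm xs k) (fun x => x) false)) := by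
        rw [ihr, hrestK]
        apply List.map_congr_left
        intro k hk
        have hkmem := (PySem.List.mem_sorted _ _ _ _).1 hk
        have hkne : k ≠ m.2 := by simpa using List.of_mem_filter hkmem
        rw [pvBucket_filter_ne dm xs m.2 k hkne]
      -- update with fresh keys appends
      have hgroup : (xs.filter (fun p => p.2 == m.2)).flatMap (fun p => dm.getD p.1 [])
          = pvBucket dm xs m.2 := rfl
      rw [hgroup]
      rw [show (PySem.Dict.update (PySem.Dict.empty.insert m.2
            (PySem.List.sorted (pvBucket dm xs m.2) (fun x => x) false))
            (pvBuild dm fuel (xs.filter (fun p => !(p.2 == m.2)))).items)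
          = ((pvBuild dm fuel (xs.filter (fun p => !(p.2 == m.2)))).items.foldl
              (fun acc p => acc.insert p.1 p.2)
              (PySem.Dict.empty.insert m.2
                (PySem.List.sorted (pvBucket dm xs m.2) (fun x => x) false))) from rfl]
      have happ := PySem.Dict.items_foldl_insert_fresh
        (pvBuild dm fuel (xs.filter (fun p => !(p.2 == m.2)))).items
        (fun p => p.1) (fun p => p.2)
        (PySem.Dict.empty.insert m.2 (PySem.List.sorted (pvBucket dm xs m.2) (fun x => x) false))
        hfresh hndrest
      rw [happ,
        PySem.Dict.items_insert_of_not_contains _ _ (by simp [PySem.Dict.contains_empty]),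
        hsplit, htail, List.map_cons]
      have hemp : (PySem.Dict.empty : PySem.Dict Int (List Int)).items = [] := rfl
      simp [hemp, Function.comp]

-- get? of a concatenated association list whose left part misses the key.
theorem pvGet?_mk_append_of_not_mem {ν : Type} (xs ys : List (Int × ν)) (k : Int)
    (h : k ∉ xs.map (fun p => p.1)) :
    (PySem.Dict.mk (xs ++ ys)).get? k = (PySem.Dict.mk ys).get? k := by
  induction xs with
  | nil => simp
  | cons p t ih =>
    simp only [List.map_cons, List.mem_cons] at h
    push Not at h
    rw [List.cons_append, PySem.Dict.get?_mk_cons]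
    simp only [beq_iff_eq, h.1.symm, if_false]
    exact ih h.2

-- A's final in-place loop "for f in d: d[f] = F(d[f])" maps F over the values, keeping order.
theorem pvMapValues (F : List Int → List Int) :
    ∀ (post pre : List (Int × List Int)),
    (((pre ++ post).map (fun p => p.1)).Nodup) →
    (((post.map (fun p => p.1)).foldl
        (fun d f => d.insert f (F (d.getD f [])))
        (PySem.Dict.mk (pre.map (fun p => (p.1, F p.2)) ++ post))).items)
      = (pre ++ post).map (fun p => (p.1, F p.2)) := by
  intro post
  induction post with
  | nil => intro pre _; simp
  | cons q t ih =>
    intro pre hnd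
    have hq1 : q.1 ∉ pre.map (fun p => p.1) := by
      intro hmem
      have hdisj := (List.nodup_append.1 (by simpa using hnd)).2.2
      exact hdisj q.1 hmem q.1 (by simp) rfl
    have hq1' : q.1 ∉ (pre.map (fun p => (p.1, F p.2))).map (fun p => p.1) := by
      simpa using hq1
    have hqt : q.1 ∉ t.map (fun p => p.1) := by
      have : ((q.1 :: t.map (fun p => p.1))).Nodup :=
        (List.nodup_append.1 (by simpa using hnd)).2.1
      exact (List.nodup_cons.1 this).1
    set d0 := PySem.Dict.mk (pre.map (fun p => (p.1, F p.2)) ++ (q :: t)) with hd0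
    have hget : d0.getD q.1 [] = q.2 := by
      unfold PySem.Dict.getD
      rw [hd0, pvGet?_mk_append_of_not_mem _ _ _ hq1']
      rw [show (q :: t) = (q.1, q.2) :: t by simp, PySem.Dict.get?_mk_cons]
      simp
    have hcont : d0.contains q.1 = true := by
      simp [PySem.Dict.contains, hd0]
    have hins : (d0.insert q.1 (F q.2)).items
        = (pre ++ [q]).map (fun p => (p.1, F p.2)) ++ t := by
      rw [PySem.Dict.items_insert_of_contains _ _ hcont, hd0]
      simp only [List.map_append, List.map_cons]
      rw [List.map_congr_left (l := pre.map (fun p => (p.1, F p.2))) (g := id)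
        (by intro p hp; simp only [List.mem_map] at hp
            obtain ⟨r, hr, hrp⟩ := hp
            have : p.1 ≠ q.1 := by
              subst hrp; simpa using fun hh => hq1 (by simpa [hh] using List.mem_map_of_mem (f := fun p => p.1) hr)
            simp [this]),
        List.map_congr_left (l := t) (g := id)
        (by intro p hp
            have : p.1 ≠ q.1 := by
              intro hh; exact hqt (by simpa [hh] using List.mem_map_of_mem (f := fun p => p.1) hp)
            simp [this])]
      simp
    have := ih (pre ++ [q]) (by simpa using hnd)
    rw [List.map_cons, List.foldl_cons, hget]
    rw [show (PySem.Dict.mk (pre.map (fun p => (p.1, F p.2)) ++ (q :: t))).insert q.1 (F q.2)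
          = PySem.Dict.mk ((pre ++ [q]).map (fun p => (p.1, F p.2)) ++ t) by
        apply PySem.Dict.ext; rw [← hd0]; exact hins]
    rw [this]
    simp

-- foldl over keys with a lookup body = foldl over items (for a nodup-keyed dict).
theorem pvFoldl_keys_items {σ : Type} (d : PySem.Dict Int Int) (hnd : d.keys.Nodup)
    (step : σ → (Int × Int) → σ) (init : σ) :
    d.keys.foldl (fun acc k => step acc (k, d.getD k 0)) init = d.items.foldl step init := by
  rw [PySem.Dict.items_eq_map_keys d hnd 0, List.foldl_map]

-- The rebuilt dict in sort_dict has exactly the sorted tuples as its items.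
theorem pvRebuild_items (xs : List (Int × Int)) (hnd : (xs.map (fun p => p.1)).Nodup) :
    (xs.foldl (fun d i => d.insert i.1 i.2) (PySem.Dict.empty : PySem.Dict Int Int)).items = xs := by
  have := PySem.Dict.items_foldl_insert_fresh xs (fun p => p.1) (fun p => p.2)
    (PySem.Dict.empty : PySem.Dict Int Int) (by intro a _; simp [PySem.Dict.contains_empty]) hnd
  simpa using this

theorem get_ordered_relevant_docs_eq (relevant_docs : List (Int × Int)) (docs_map : List (Int × List Int)) :
    get_ordered_relevant_docs relevant_docs docs_map
      = get_ordered_relevant_docs_alt relevant_docs docs_map := by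
  unfold get_ordered_relevant_docs get_ordered_relevant_docs_alt
  simp only []
  set rd : PySem.Dict Int Int := PySem.Dict.ofList relevant_docs with hrd
  set dm : PySem.Dict Int (List Int) := PySem.Dict.ofList docs_map with hdm
  set L := rd.items with hL
  set S := PySem.List.sorted L (fun x => x.2) true with hS
  have hLnd : (L.map (fun p => p.1)).Nodup := by
    have : L.map (fun p => p.1) = rd.keys := rfl
    rw [this]; exact PySem.Dict.nodup_keys_ofList relevant_docs
  have hSL : S.Perm L := PySem.List.sorted_perm L _ true
  have hSnd : (S.map (fun p => p.1)).Nodup := (hSL.map _).nodup_iff.2 hLnd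
  -- Step 1: the rebuilt dict rd2 is literally Dict.mk S
  have hrd2 : (S.foldl (fun d i => d.insert i.1 i.2) (PySem.Dict.empty : PySem.Dict Int Int))
      = PySem.Dict.mk S := PySem.Dict.ext (pvRebuild_items S hSnd)
  rw [hrd2]
  have hkeysnd : (PySem.Dict.mk S).keys.Nodup := by simpa [PySem.Dict.keys_mk] using hSnd
  -- Step 2+3: A's grouping loop is the grouping fold over S
  have hloop :
      ((PySem.Dict.mk S).keys.foldl (fun d doc_hash =>
        let frequency := (PySem.Dict.mk S).getD doc_hash 0
        let docs_numbers := dm.getD doc_hash []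
        let d := if d.contains frequency then d else d.insert frequency []
        d.insert frequency (d.getD frequency [] ++ docs_numbers)) PySem.Dict.empty)
      = pvGroup dm S := by
    have hb : ∀ (d : PySem.Dict Int (List Int)) (p : Int × Int),
        (let frequency := p.2
         let docs_numbers := dm.getD p.1 []
         let d' := if d.contains frequency then d else d.insert frequency []
         d'.insert frequency (d'.getD frequency [] ++ docs_numbers))
        = d.insert p.2 (d.getD p.2 [] ++ dm.getD p.1 []) := by
      intro d p; exact pvBody_eq d p.2 (dm.getD p.1 [])
    calc ((PySem.Dict.mk S).keys.foldl _ PySem.Dict.empty)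
        = (PySem.Dict.mk S).items.foldl (fun d p =>
            let frequency := p.2
            let docs_numbers := dm.getD p.1 []
            let d' := if d.contains frequency then d else d.insert frequency []
            d'.insert frequency (d'.getD frequency [] ++ docs_numbers)) PySem.Dict.empty := by
          exact pvFoldl_keys_items (PySem.Dict.mk S) hkeysnd (fun d p =>
            let frequency := p.2
            let docs_numbers := dm.getD p.1 []
            let d' := if d.contains frequency then d else d.insert frequency []
            d'.insert frequency (d'.getD frequency [] ++ docs_numbers)) PySem.Dict.empty
      _ = S.foldl (fun g p => g.insert p.2 (g.getD p.2 [] ++ dm.getD p.1 [])) PySem.Dict.empty := by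
          exact PySem.List.foldl_congr_mem _ _ _ _ (fun g p _ => hb g p)
      _ = pvGroup dm S := rfl
  rw [hloop]
  -- Step 4: A's final loop maps per-bucket sorting over the items
  have hfinal :
      ((pvGroup dm S).keys.foldl (fun d frequency =>
          d.insert frequency (PySem.List.sorted (d.getD frequency []) (fun x => x) false))
        (pvGroup dm S)).items
      = (pvGroup dm S).items.map (fun p => (p.1, PySem.List.sorted p.2 (fun x => x) false)) := by
    have hknd := pvGroup_keys_nodup dm S
    have hkeys : (pvGroup dm S).keys = (pvGroup dm S).items.map (fun p => p.1) := rfl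
    have := pvMapValues (fun v => PySem.List.sorted v (fun x => x) false)
      (pvGroup dm S).items [] (by simpa using (hkeys ▸ hknd))
    simpa [← hkeys] using this
  rw [hfinal]
  -- Step 5: express A through its (strictly descending) key list and buckets
  rw [PySem.Dict.items_eq_map_keys (pvGroup dm S) (pvGroup_keys_nodup dm S) [], List.map_map]
  -- Step 6: B's characterisation
  rw [pvBuild_items dm L.length L (le_refl _)]
  -- B's sorted key list is exactly A's key list
  have hdesc : ((pvGroup dm S).keys).Pairwise (fun a b => b < a) := by
    rw [pvGroup_keys]
    exact pvOfList_pairwise_gt (by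
      have := PySem.List.sorted_pairwise_rev L (fun x : Int × Int => x.2)
      rw [← hS] at this
      exact List.pairwise_map.2 this)
  have hkeyperm : (PySem.Set.ofList (L.map (fun p => p.2))).Perm ((pvGroup dm S).keys) := by
    rw [pvGroup_keys]
    apply (List.perm_ext_iff_of_nodup (PySem.Set.nodup_ofList _) (PySem.Set.nodup_ofList _)).2
    intro a
    rw [PySem.Set.mem_ofList, PySem.Set.mem_ofList]
    exact ⟨fun ha => (hSL.symm.map _).mem_iff.1 ha, fun ha => (hSL.symm.map _).mem_iff.2 ha⟩
  have hsortkeys : PySem.List.sorted (PySem.Set.ofList (L.map (fun p => p.2))) (fun f => f) true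
      = (pvGroup dm S).keys :=
    PySem.List.sorted_rev_eq_of_perm_of_pairwise_gt _ _ _ hkeyperm.symm hdesc
  rw [hsortkeys]
  -- compare bucket by bucket
  apply List.map_congr_left
  intro k _
  simp only [Function.comp]
  rw [pvGroup_getD]
  have hperm := pvBucket_perm dm hSL.symm k
  exact congrArg (fun l => (k, l))
    (PySem.List.sorted_eq_sorted_of_perm _ _ _ (fun a b h => h) hperm).symm

-- ===== VERDICT (by name: the statement is the Claim_ definition above) =====
theorem get_ordered_relevant_docs_spec : Claim_equal_get_ordered_relevant_docs := by
  intro relevant_docs docs_map _ _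
  unfold Spec_get_ordered_relevant_docs
  exact get_ordered_relevant_docs_eq relevant_docs docs_map
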